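-- pv_equiv track=rewrite | github.com/jhiltonsantos/ADS-Algoritmos-IFPI | URI/uri_1124_aceita_criptografia.py | criptografia
-- ===== SOURCE A (Python) =====
-- def criptografia(frase):
--     # PRIMEIRA ETAPA
--     etapa_um = ''
--     tamanho_frase = len(frase)
--
--     for i in range(tamanho_frase):
--         posicao = frase[i]
--         if ((posicao>='A') and (posicao<='Z')) or\
--             ((posicao>='a') and (posicao<='z')):
--             etapa_um += chr(ord(posicao) + 3)
--         else:
--             etapa_um += posicao
--
--     # SEGUNDA ETAPA
--     etapa_um = etapa_um[::-1]
--
--     # TERCEIRA ETAPA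
--     soma = ''
--     tamanho_e1 = len(etapa_um)
--     divisao = tamanho_e1/2
--     divisao = int(divisao)
--
--     for i in range(tamanho_e1):
--         posicao_e1 = etapa_um[i]
--         if i >= divisao:
--             soma += chr(ord(posicao_e1) - 1)
--         else:
--             soma += posicao_e1
--
--     return soma
-- ===== SOURCE B (Python) =====
-- def criptografia(frase):
--     n = len(frase)
--     k = n - n // 2  # output positions < n//2 read source indices n-1 .. k
--     def desloca(c):
--         return chr(ord(c) + 3) if ('A' <= c <= 'Z') or ('a' <= c <= 'z') else c
--     primeira = [desloca(c) for c in reversed(frase[k:])]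
--     segunda = [chr(ord(desloca(c)) - 1) for c in reversed(frase[:k])]
--     return ''.join(primeira + segunda)
-- ===== Notes on version B (the rewrite author's own statement) =====
-- stated objective: simpler
-- what changed: B replaces A's three staged passes (build shifted string, reverse it, rebuild with second-half decrement) by two half-slice comprehensions read back-to-front and joined once, with no intermediate reversed string.
import Mathlib
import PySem

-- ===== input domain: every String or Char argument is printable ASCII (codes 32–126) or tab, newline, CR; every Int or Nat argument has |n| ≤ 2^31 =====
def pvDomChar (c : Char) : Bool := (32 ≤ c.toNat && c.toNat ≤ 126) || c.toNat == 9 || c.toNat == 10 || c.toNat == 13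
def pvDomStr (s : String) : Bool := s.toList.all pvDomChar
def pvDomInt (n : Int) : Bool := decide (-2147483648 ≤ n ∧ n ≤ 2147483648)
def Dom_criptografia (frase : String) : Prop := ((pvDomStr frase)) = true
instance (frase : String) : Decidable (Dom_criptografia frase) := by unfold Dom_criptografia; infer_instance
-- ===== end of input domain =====

-- B reads the input back-to-front in two half-slices (no staged shift/reverse/decrement strings); objective: simpler.


-- ===== PORT A =====
-- frase[i] for i in range(len(frase)) is always in range: getD never hits its default.
def criptografia (frase : String) : String :=
  let cs := frase.toList
  let tamanho_frase := cs.length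
  let etapa_um := (List.range tamanho_frase).foldl (fun acc i =>
    let posicao := cs.getD i ' '
    acc ++ [if (('A' ≤ posicao ∧ posicao ≤ 'Z') ∨ ('a' ≤ posicao ∧ posicao ≤ 'z'))
            then Char.ofNat (posicao.toNat + 3) else posicao]) []
  let etapa_um := etapa_um.reverse          -- etapa_um[::-1]
  let tamanho_e1 := etapa_um.length
  let divisao := tamanho_e1 / 2             -- int(n/2) = n // 2 for these lengths (float n/2 is exact)
  let soma := (List.range tamanho_e1).foldl (fun acc i =>
    let posicao_e1 := etapa_um.getD i ' '
    acc ++ [if i ≥ divisao then Char.ofNat (posicao_e1.toNat - 1) else posicao_e1]) []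
  String.ofList soma

-- ===== PORT B =====
def desloca (c : Char) : Char :=
  if (('A' ≤ c ∧ c ≤ 'Z') ∨ ('a' ≤ c ∧ c ≤ 'z')) then Char.ofNat (c.toNat + 3) else c

-- frase[k:] / frase[:k] with 0 ≤ k ≤ len are exactly List.drop k / List.take k.
def criptografia_alt (frase : String) : String :=
  let cs := frase.toList
  let n := cs.length
  let k := n - n / 2
  let primeira := ((cs.drop k).reverse).map desloca
  let segunda := ((cs.take k).reverse).map (fun c => Char.ofNat ((desloca c).toNat - 1))
  String.ofList (primeira ++ segunda)

-- ===== PRECONDITION & SPEC =====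
def Spec_criptografia (frase : String) (out : String) : Prop := out = criptografia_alt frase
instance (frase : String) (out : String) : Decidable (Spec_criptografia frase out) := by unfold Spec_criptografia; infer_instance

-- ===== CLAIM (what is proved, stated in full; the proofs are below) =====
def Claim_equal_criptografia : Prop := ∀ (frase : String), Dom_criptografia frase → Spec_criptografia frase (criptografia frase)

-- ===== LEMMAS AND PROOFS =====

-- A's index-append loops, as maps over the index range.
theorem foldl_push {α : Type} (g : Nat → α) :
    ∀ (n : Nat) (init : List α),
      (List.range n).foldl (fun acc i => acc ++ [g i]) init = init ++ (List.range n).map g := by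
  intro n
  induction n with
  | zero => simp
  | succ m ih => intro init; simp [List.range_succ, List.foldl_append, ih]

-- Indexed map over a list's range is a map over the list.
theorem map_range_getD {α β : Type} (l : List α) (d : α) (f : α → β) :
    (List.range l.length).map (fun i => f (l.getD i d)) = l.map f := by
  apply List.ext_getElem
  · simp
  · intro i h1 h2
    simp only [List.length_map, List.length_range] at h1
    simp only [List.getElem_map, List.getElem_range, List.getD_eq_getElem l d h1]

-- Splitting the second loop at the midpoint.
theorem map_range_split {α : Type} (l : List α) (d : α) (h : Nat) (f : α → α) (hh : h ≤ l.length) :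
    (List.range l.length).map (fun i => if i ≥ h then f (l.getD i d) else l.getD i d)
      = l.take h ++ (l.drop h).map f := by
  apply List.ext_getElem
  · simp; omega
  · intro i h1 h2
    simp only [List.length_map, List.length_range] at h1
    simp only [List.getElem_map, List.getElem_range, List.getD_eq_getElem l d h1]
    by_cases hi : h ≤ i
    · rw [List.getElem_append_right (by simp [Nat.min_eq_left hh]; omega)]
      rw [if_pos hi]
      have hidx : h + (i - (List.take h l).length) = i := by simp [Nat.min_eq_left hh]; omega
      simp only [List.getElem_map, List.getElem_drop]
      simp only [hidx]
    · rw [List.getElem_append_left (by simp [Nat.min_eq_left hh]; omega)]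
      simp [hi, List.getElem_take]

theorem criptografia_spec : Claim_equal_criptografia := by
  unfold Claim_equal_criptografia Spec_criptografia criptografia criptografia_alt
  intro frase _
  dsimp only
  rw [foldl_push, foldl_push]
  simp only [List.nil_append]
  have h1 : (List.range frase.toList.length).map (fun i =>
      if (('A' ≤ frase.toList.getD i ' ' ∧ frase.toList.getD i ' ' ≤ 'Z') ∨
          ('a' ≤ frase.toList.getD i ' ' ∧ frase.toList.getD i ' ' ≤ 'z'))
      then Char.ofNat ((frase.toList.getD i ' ').toNat + 3) else frase.toList.getD i ' ')
      = frase.toList.map desloca := by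
    rw [← map_range_getD frase.toList ' ' desloca]; simp [desloca]
  rw [h1]
  simp only [List.length_reverse, List.length_map]
  have hsplit := map_range_split ((frase.toList.map desloca).reverse) ' '
      (frase.toList.length / 2) (fun c => Char.ofNat (c.toNat - 1)) (by simp; omega)
  simp only [List.length_reverse, List.length_map] at hsplit
  rw [hsplit]
  congr 1
  congr 1
  · rw [List.take_reverse, List.length_map, ← List.map_drop, List.map_reverse]
  · rw [List.drop_reverse, List.length_map, ← List.map_take, ← List.map_reverse, List.map_map]
    rfl
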